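-- pv_equiv track=rewrite | github.com/HOMEFTW/AndgateTechnology | tools/generate_multiblock.py | generate_single_layer
-- ===== SOURCE A (Python) =====
-- def generate_single_layer(w, char, with_air=True):
--     """生成单个正方形层"""
--     z_plane = []
--     for z in range(w):
--         row = ""
--         for x in range(w):
--             if x == 0 or x == w - 1 or z == 0 or z == w - 1:
--                 row += char
--             else:
--                 row += '-' if with_air else char
--         z_plane.append(row)
--     return z_plane
-- ===== SOURCE B (Python) =====
-- def generate_single_layer(w, char, with_air=True):
--     """生成单个正方形层"""
--     if w <= 0:
--         return []
--     border = char * w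
--     if w == 1:
--         return [border]
--     fill = '-' if with_air else char
--     interior = char + fill * (w - 2) + char
--     return [border] + [interior] * (w - 2) + [border]
-- ===== Notes on version B (the rewrite author's own statement) =====
-- stated objective: simpler
-- what changed: B builds two row templates (border via string multiplication, interior via char + fill*(w-2) + char) and replicates the interior row (w-2) times, instead of A's nested per-cell loop with a border test at every cell.
import Mathlib
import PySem

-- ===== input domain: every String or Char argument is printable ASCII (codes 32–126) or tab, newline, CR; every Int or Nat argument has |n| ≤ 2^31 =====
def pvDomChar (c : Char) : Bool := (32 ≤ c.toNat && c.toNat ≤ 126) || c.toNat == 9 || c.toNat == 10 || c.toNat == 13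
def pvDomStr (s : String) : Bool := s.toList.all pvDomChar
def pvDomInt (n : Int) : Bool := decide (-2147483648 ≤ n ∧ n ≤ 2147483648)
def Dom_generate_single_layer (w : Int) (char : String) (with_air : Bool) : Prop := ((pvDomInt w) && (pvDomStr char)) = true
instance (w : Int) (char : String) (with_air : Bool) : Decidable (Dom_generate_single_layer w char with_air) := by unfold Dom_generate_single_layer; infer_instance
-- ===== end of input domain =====

-- ===== PORT A =====
-- A: nested per-cell loop; rows are built by string concatenation (ported on List Char,
-- exact, wrapped with String.ofList when the row is appended).
def generate_single_layer (w : Int) (char : String) (with_air : Bool) : List String :=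
  (PySem.List.pyRange 0 w 1).foldl (fun z_plane z =>
    z_plane ++ [String.ofList ((PySem.List.pyRange 0 w 1).foldl (fun row x =>
      row ++ (if x = 0 ∨ x = w - 1 ∨ z = 0 ∨ z = w - 1 then char.toList
              else if with_air then ['-'] else char.toList)) [])]) []

-- ===== PORT B =====
-- B: two row templates and replication, no per-cell loop.
-- Python's string multiplication s * n (exact: empty for n <= 0).
def pyStrMul (s : String) (n : Int) : String :=
  String.ofList (List.replicate n.toNat s.toList).flatten

def generate_single_layer_alt (w : Int) (char : String) (with_air : Bool) : List String :=
  if w <= 0 then []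
  else
    let border := pyStrMul char w
    if w = 1 then [border]
    else
      let fill := if with_air then "-" else char
      let interior := String.ofList (char.toList ++ (pyStrMul fill (w - 2)).toList ++ char.toList)
      [border] ++ List.replicate (w - 2).toNat interior ++ [border]

-- ===== PRECONDITION & SPEC =====
def Spec_generate_single_layer (w : Int) (char : String) (with_air : Bool) (out : List String) : Prop := out = generate_single_layer_alt w char with_air
instance (w : Int) (char : String) (with_air : Bool) (out : List String) : Decidable (Spec_generate_single_layer w char with_air out) := by unfold Spec_generate_single_layer; infer_instance

-- ===== CLAIM (what is proved, stated in full; the proofs are below) =====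
def Claim_equal_generate_single_layer : Prop := ∀ (w : Int) (char : String) (with_air : Bool), Dom_generate_single_layer w char with_air → Spec_generate_single_layer w char with_air (generate_single_layer w char with_air)

-- ===== LEMMAS AND PROOFS =====

-- ===== VERDICT (by name: the statement is the Claim_ definition above) =====
-- the cell content A appends for coordinates (z, x)
def pvCell (w : Int) (char : String) (with_air : Bool) (z x : Int) : List Char :=
  if x = 0 ∨ x = w - 1 ∨ z = 0 ∨ z = w - 1 then char.toList
  else if with_air then ['-'] else char.toList

theorem flatMap_const {α β : Type} (l : List α) (c : List β) :
    l.flatMap (fun _ => c) = (List.replicate l.length c).flatten := by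
  induction l with
  | nil => simp
  | cons a t ih => simp [List.flatMap_cons, List.replicate_succ, ih]

theorem pvRange_split (w : Int) (hw : 2 ≤ w) :
    PySem.List.pyRange 0 w 1 = 0 :: (PySem.List.pyRange 1 (w - 1) 1 ++ [w - 1]) := by
  have h1 : PySem.List.pyRange 0 w 1 = 0 :: PySem.List.pyRange 1 w 1 :=
    PySem.List.pyRange_one_cons (by omega)
  have h2 : PySem.List.pyRange 1 ((w - 1) + 1) 1 = PySem.List.pyRange 1 (w - 1) 1 ++ [w - 1] :=
    PySem.List.pyRange_one_succ_right (by omega)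
  rw [h1]
  have : (w - 1) + 1 = w := by ring
  rw [this] at h2
  rw [h2]

theorem pvMid_len (w : Int) : (PySem.List.pyRange 1 (w - 1) 1).length = (w - 2).toNat := by
  rw [PySem.List.length_pyRange_one]; omega

-- the row A builds for plane coordinate z
theorem pvRow_eq (w : Int) (char : String) (with_air : Bool) (z : Int) (hw : 2 ≤ w) :
    (PySem.List.pyRange 0 w 1).foldl (fun row x => row ++ pvCell w char with_air z x) [] =
      if z = 0 ∨ z = w - 1 then (List.replicate w.toNat char.toList).flatten
      else char.toList ++ (List.replicate (w - 2).toNat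
        (if with_air then ['-'] else char.toList)).flatten ++ char.toList := by
  rw [PySem.List.foldl_append_eq_flatMap]
  by_cases hz : z = 0 ∨ z = w - 1
  · simp only [hz, if_pos]
    have : ∀ x ∈ PySem.List.pyRange 0 w 1,
        pvCell w char with_air z x = char.toList := by
      intro x hx
      simp [pvCell, hz.elim (fun h => Or.inr (Or.inr (Or.inl h)))
        (fun h => Or.inr (Or.inr (Or.inr h)))]
    rw [List.flatMap_congr this, flatMap_const, PySem.List.length_pyRange_one]
    simp
  · simp only [hz, if_neg, not_false_iff]
    rw [pvRange_split w hw]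
    simp only [List.flatMap_cons, List.flatMap_append, List.flatMap_cons, List.flatMap_nil]
    have hc0 : pvCell w char with_air z 0 = char.toList := by simp [pvCell]
    have hcw : pvCell w char with_air z (w - 1) = char.toList := by simp [pvCell]
    have hmid : ∀ x ∈ PySem.List.pyRange 1 (w - 1) 1,
        pvCell w char with_air z x = (if with_air then ['-'] else char.toList) := by
      intro x hx
      rw [PySem.List.mem_pyRange_one] at hx
      push_neg at hz
      simp [pvCell, show ¬(x = 0 ∨ x = w - 1 ∨ z = 0 ∨ z = w - 1) by omega]
    rw [List.flatMap_congr hmid, flatMap_const, pvMid_len, hc0, hcw]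
    simp

theorem generate_single_layer_spec : Claim_equal_generate_single_layer := by
  intro w char with_air _
  unfold Spec_generate_single_layer generate_single_layer generate_single_layer_alt
  by_cases h0 : w <= 0
  · rw [PySem.List.pyRange_one_eq_nil (by omega)]
    simp [h0]
  · by_cases h1 : w = 1
    · subst h1
      rw [PySem.List.pyRange_one_cons (by omega : (0:Int) < 1)]
      have hnil : PySem.List.pyRange (0 + 1) 1 1 = [] :=
        PySem.List.pyRange_one_eq_nil (by omega)
      rw [hnil]
      simp [pyStrMul]
    · have hw : 2 ≤ w := by omega
      simp only [if_neg h0, if_neg h1]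
      rw [PySem.List.foldl_append_singleton_eq_map]
      have key : ∀ z : Int, (PySem.List.pyRange 0 w 1).foldl (fun row x =>
          row ++ (if x = 0 ∨ x = w - 1 ∨ z = 0 ∨ z = w - 1 then char.toList
                  else if with_air then ['-'] else char.toList)) [] =
          if z = 0 ∨ z = w - 1 then (List.replicate w.toNat char.toList).flatten
          else char.toList ++ (List.replicate (w - 2).toNat
            (if with_air then ['-'] else char.toList)).flatten ++ char.toList :=
        fun z => pvRow_eq w char with_air z hw
      have hmap : (PySem.List.pyRange 0 w 1).map (fun z => String.ofList
          ((PySem.List.pyRange 0 w 1).foldl (fun row x =>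
            row ++ (if x = 0 ∨ x = w - 1 ∨ z = 0 ∨ z = w - 1 then char.toList
                    else if with_air then ['-'] else char.toList)) [])) =
          (PySem.List.pyRange 0 w 1).map (fun z => String.ofList
            (if z = 0 ∨ z = w - 1 then (List.replicate w.toNat char.toList).flatten
             else char.toList ++ (List.replicate (w - 2).toNat
               (if with_air then ['-'] else char.toList)).flatten ++ char.toList)) :=
        List.map_congr_left (fun z _ => by rw [key z])
      rw [hmap, pvRange_split w hw]
      simp only [List.map_cons, List.map_append, List.map_nil, List.nil_append]
      simp only [true_or, or_true, if_true]
      have hmid : (PySem.List.pyRange 1 (w - 1) 1).map (fun z => String.ofList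
          (if z = 0 ∨ z = w - 1 then (List.replicate w.toNat char.toList).flatten
           else char.toList ++ (List.replicate (w - 2).toNat
             (if with_air then ['-'] else char.toList)).flatten ++ char.toList)) =
          List.replicate (w - 2).toNat (String.ofList (char.toList ++
            (List.replicate (w - 2).toNat (if with_air then ['-'] else char.toList)).flatten
            ++ char.toList)) := by
        have hfn : ∀ z ∈ PySem.List.pyRange 1 (w - 1) 1,
            String.ofList (if z = 0 ∨ z = w - 1 then (List.replicate w.toNat char.toList).flatten
              else char.toList ++ (List.replicate (w - 2).toNat
                (if with_air then ['-'] else char.toList)).flatten ++ char.toList) =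
            String.ofList (char.toList ++ (List.replicate (w - 2).toNat
              (if with_air then ['-'] else char.toList)).flatten ++ char.toList) := by
          intro z hz
          rw [PySem.List.mem_pyRange_one] at hz
          have : ¬(z = 0 ∨ z = w - 1) := by omega
          rw [if_neg this]
        rw [List.map_congr_left hfn, List.map_const', pvMid_len w]
      rw [hmid]
      cases with_air <;> simp [pyStrMul]
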